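-- pv_equiv track=rewrite | github.com/beskrovniibv/yaintern | training/algorithm/4.0/0. warm-up/j.py | solve
-- ===== SOURCE A (Python) =====
-- def solve(n, a, b):
--     dp = [0] * (n + 1)
--     dp[a:b] = [1] * (b - a + 1)
--     for i in range(b + 1, n + 1):
--         if i % a == 0:
--             dp[i] = 1
--         l = i - b
--         r = i - a
--         if 1 in dp[l:r + 1]:
--             dp[i] = 1
--         else:
--             dp[i] = 0
--     return dp[n] != 0
-- ===== SOURCE B (Python) =====
-- def solve(n, a, b):
--     # closed form: n is reachable iff some k >= 1 has k*a <= n <= k*b;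
--     # the minimal candidate k is ceil(n/b), so one O(1) check suffices.
--     k = max(1, -(-n // b))
--     return k * a <= n <= k * b
-- ===== Notes on version B (the rewrite author's own statement) =====
-- stated objective: faster
-- what changed: B replaces A's O(n*(b-a)) dynamic-programming loop (rescanning a window slice for every i up to n) by an O(1) closed form: n is reachable iff the minimal k with n <= k*b, i.e. k = max(1, ceil(n/b)), also satisfies k*a <= n.
-- outside the precondition, e.g. on solve(-1, 2, 3): A returns True, B returns False; on solve(3, 1, 0): A returns False, B raises ZeroDivisionError
import Mathlib
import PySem

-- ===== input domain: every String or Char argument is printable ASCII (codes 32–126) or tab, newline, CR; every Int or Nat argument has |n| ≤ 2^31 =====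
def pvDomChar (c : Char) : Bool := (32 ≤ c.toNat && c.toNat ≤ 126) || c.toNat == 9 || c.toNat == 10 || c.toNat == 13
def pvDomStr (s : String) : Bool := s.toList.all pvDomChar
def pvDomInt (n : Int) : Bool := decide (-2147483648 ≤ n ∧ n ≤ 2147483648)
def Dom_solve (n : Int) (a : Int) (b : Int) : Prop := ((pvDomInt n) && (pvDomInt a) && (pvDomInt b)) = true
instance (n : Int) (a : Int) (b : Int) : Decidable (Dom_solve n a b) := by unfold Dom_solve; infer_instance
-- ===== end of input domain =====

-- B replaces the O(n·(b-a)) window DP by the O(1) closed form: n is reachable iff the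
-- minimal k with n ≤ k*b (k = max(1, ceil(n/b))) also satisfies k*a ≤ n.


-- ===== PORT A =====
-- dp = [0] * (n + 1); dp[a:b] = [1] * (b - a + 1)
-- the slice ASSIGNMENT is hand-ported (PySem has no slice-assign) and Python-exact for every a, b:
-- both bounds are clamped with Python's rule (PySem.List.clampIdx), stop is at least start,
-- and the replacement may reshape the list, exactly as in Python.
def solveInit (n : Int) (a : Int) (b : Int) : List Int :=
  let dp : List Int := List.replicate (n + 1).toNat 0
  let s : Nat := PySem.List.clampIdx dp.length a
  let t : Nat := max s (PySem.List.clampIdx dp.length b)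
  dp.take s ++ List.replicate (b - a + 1).toNat 1 ++ dp.drop t

-- one iteration of A's loop body (i % a == 0 write, then the window test, exactly A's order)
def solveStep (a : Int) (b : Int) (dp : List Int) (i : Int) : List Int :=
  let dp := if PySem.Int.mod i a = 0 then PySem.List.pySetD dp i 1 else dp
  let l := i - b
  let r := i - a
  if (PySem.List.slice dp (some l) (some (r + 1))).contains 1 then
    PySem.List.pySetD dp i 1
  else
    PySem.List.pySetD dp i 0

def solve (n : Int) (a : Int) (b : Int) : Bool :=
  let dp := (PySem.List.pyRange (b + 1) (n + 1) 1).foldl (solveStep a b) (solveInit n a b)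
  PySem.List.pyGetD dp n 0 != 0   -- dp[n] != 0 (in range under Pre_solve)

-- ===== PORT B =====
def solve_alt (n : Int) (a : Int) (b : Int) : Bool :=
  let k := max 1 (-(PySem.Int.floordiv (-n) b))   -- max(1, -(-n // b)) = max(1, ceil(n/b))
  decide (k * a ≤ n) && decide (n ≤ k * b)

-- ===== PRECONDITION & SPEC =====
-- Pre_ is the problem's natural domain (non-negative target, positive upper bound b), minus the
-- divisions by zero: a = 0 with b < n (A raises ZeroDivisionError at 'i % a'). Excluded as well:
-- n < 0 (dp starts empty: A raises IndexError or returns a negative-index accident) and b ≤ 0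
-- (negative slice bound accidents; B's '//' would divide by 0 at b = 0).
def Pre_solve (n : Int) (a : Int) (b : Int) : Prop := 0 ≤ n ∧ 1 ≤ b ∧ (a = 0 → n ≤ b)
instance (n : Int) (a : Int) (b : Int) : Decidable (Pre_solve n a b) := by unfold Pre_solve; infer_instance
def pvWitness_solve : Int × Int × Int := (10, 2, 3)

def Spec_solve (n : Int) (a : Int) (b : Int) (out : Bool) : Prop := out = solve_alt n a b
instance (n : Int) (a : Int) (b : Int) (out : Bool) : Decidable (Spec_solve n a b out) := by unfold Spec_solve; infer_instance

-- ===== CLAIM (what is proved, stated in full; the proofs are below) =====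
def Claim_equal_solve : Prop := ∀ (n : Int) (a : Int) (b : Int), Dom_solve n a b → Pre_solve n a b → Spec_solve n a b (solve n a b)

-- ===== LEMMAS AND PROOFS =====

-- n is a sum of k ≥ 1 numbers, each in [a,b]
def reach (a : Int) (b : Int) (x : Int) : Prop := ∃ k : Int, 1 ≤ k ∧ k * a ≤ x ∧ x ≤ k * b

lemma reach_base {a b x : Int} (ha : 1 ≤ a) (hx : x ≤ b) : reach a b x ↔ a ≤ x := by
  constructor
  · rintro ⟨k, hk, hka, _⟩
    nlinarith
  · intro h; exact ⟨1, le_refl _, by omega, by omega⟩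

lemma reach_not_of_gt {a b x : Int} (hab : b < a) : ¬ reach a b x := by
  rintro ⟨k, hk, hka, hkb⟩
  nlinarith

lemma reach_step {a b i : Int} (ha : 1 ≤ a) (hab : a ≤ b) (hi : b < i) :
    reach a b i ↔ ∃ j : Int, i - b ≤ j ∧ j ≤ i - a ∧ reach a b j := by
  constructor
  · rintro ⟨k, hk, hka, hkb⟩
    have hk2 : 2 ≤ k := by nlinarith
    refine ⟨max (i - b) ((k - 1) * a), le_max_left _ _, ?_, k - 1, by omega, le_max_right _ _, ?_⟩
    · have h1 : i - b ≤ i - a := by omega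
      have h2 : (k - 1) * a ≤ i - a := by nlinarith
      omega
    · have h1 : i - b ≤ (k - 1) * b := by nlinarith
      have h2 : (k - 1) * a ≤ (k - 1) * b := by nlinarith
      omega
  · rintro ⟨j, hjl, hjr, k, hk, hka, hkb⟩
    exact ⟨k + 1, by omega, by nlinarith, by nlinarith⟩

lemma solve_alt_iff {n a b : Int} (ha : 1 ≤ a) (hb : 1 ≤ b) :
    solve_alt n a b = true ↔ reach a b n := by
  unfold solve_alt
  set q : Int := -(PySem.Int.floordiv (-n) b) with hq
  have hqc : (q - 1) * b < n ∧ n ≤ q * b :=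
    (PySem.Int.neg_floordiv_neg_eq_iff_of_pos (a := n) (b := b) (q := q) (by omega)).mp hq.symm
  simp only [Bool.and_eq_true, decide_eq_true_eq]
  constructor
  · rintro ⟨h1, h2⟩
    exact ⟨max 1 q, le_max_left _ _, h1, h2⟩
  · rintro ⟨k, hk, hka, hkb⟩
    have hqk : q ≤ k := by nlinarith
    have hmk : max 1 q ≤ k := by omega
    constructor
    · nlinarith [le_max_left 1 q, le_max_right 1 q]
    · have hq1 : q ≤ max 1 q := le_max_right 1 q
      rcases max_choice 1 q with h | h
      · rw [h] at hq1 ⊢; nlinarith [hqc.2]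
      · rw [h]; exact hqc.2

-- getD of the three-block pattern the slice assignment builds
lemma getD_pattern (s m r j : Nat) :
    (List.replicate s (0:Int) ++ List.replicate m 1 ++ List.replicate r 0).getD j 0
      = if s ≤ j ∧ j < s + m then 1 else 0 := by
  simp only [List.getD_eq_getElem?_getD, List.getElem?_append, List.getElem?_replicate,
    List.length_append, List.length_replicate]
  split_ifs <;> simp_all <;> omega

lemma clampIdx_int (L : Nat) (a : Int) :
    ((PySem.List.clampIdx L a : Nat) : Int) = max 0 (min (if a < 0 then (L:Int) + a else a) (L:Int)) := by
  simp only [PySem.List.clampIdx]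
  split_ifs <;> push_cast <;> omega

lemma solveInit_eq (n a b : Int) :
    solveInit n a b =
      List.replicate (PySem.List.clampIdx (n+1).toNat a) (0:Int)
        ++ List.replicate (b - a + 1).toNat 1
        ++ List.replicate ((n+1).toNat
            - max (PySem.List.clampIdx (n+1).toNat a) (PySem.List.clampIdx (n+1).toNat b)) 0 := by
  unfold solveInit
  simp only [List.length_replicate, List.take_replicate, List.drop_replicate]
  rw [Nat.min_comm, Nat.min_eq_right (PySem.List.clampIdx_le _ _)]

lemma solveInit_getD {n a b : Int} (hb : 1 ≤ b) (hn : 0 ≤ n) (ha : 1 ≤ a)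
    (j : Nat) (hj : (j : Int) ≤ n) :
    (solveInit n a b).getD j 0 = if a ≤ (j:Int) ∧ (j:Int) ≤ b then 1 else 0 := by
  rw [solveInit_eq n a b, getD_pattern]
  have h1 : ((n+1).toNat : Int) = n + 1 := by omega
  have hs := clampIdx_int (n+1).toNat a
  rw [if_neg (by omega : ¬ a < 0)] at hs
  rcases le_or_gt a b with hab | hab
  · have hm : ((b - a + 1).toNat : Int) = b - a + 1 := by omega
    split_ifs with h2 h3 h3 <;> first | rfl | (exfalso; omega)
  · have hm : (b - a + 1).toNat = 0 := by omega
    split_ifs with h2 h3 h3 <;> first | rfl | (exfalso; omega)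

lemma solveInit_len {n a b : Int} (hb : 1 ≤ b) (hn : 0 ≤ n) :
    (n+1).toNat ≤ (solveInit n a b).length := by
  rw [solveInit_eq n a b]
  simp only [List.length_append, List.length_replicate]
  have hsa := clampIdx_int (n+1).toNat a
  have hsb := clampIdx_int (n+1).toNat b
  rw [if_neg (by omega : ¬ b < 0)] at hsb
  split_ifs at hsa <;> omega

lemma solveInit_len2 {n a b : Int} :
    PySem.List.clampIdx (n+1).toNat a + (b - a + 1).toNat ≤ (solveInit n a b).length := by
  rw [solveInit_eq n a b]
  simp only [List.length_append, List.length_replicate]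
  omega

-- membership of 1 in a dropped/taken window, as an indexed statement
lemma mem_drop_take {xs : List Int} {u v : Nat} :
    (1:Int) ∈ (xs.drop u).take v ↔
      ∃ j : Nat, u ≤ j ∧ j < u + v ∧ j < xs.length ∧ xs.getD j 0 = 1 := by
  rw [List.mem_iff_getElem?]
  constructor
  · rintro ⟨i, hi⟩
    rw [List.getElem?_take] at hi
    by_cases hiv : i < v
    · rw [if_pos hiv, List.getElem?_drop] at hi
      have hlen : u + i < xs.length := (List.getElem?_eq_some_iff.mp hi).1
      refine ⟨u + i, by omega, by omega, hlen, ?_⟩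
      rw [List.getD_eq_getElem?_getD, hi]; rfl
    · rw [if_neg hiv] at hi; cases hi
  · rintro ⟨j, h1, h2, h3, h4⟩
    refine ⟨j - u, ?_⟩
    rw [List.getElem?_take, if_pos (by omega : j - u < v), List.getElem?_drop,
        (by omega : u + (j - u) = j)]
    rw [List.getD_eq_getElem?_getD] at h4
    rcases hx : xs[j]? with _ | x
    · rw [List.getElem?_eq_none_iff] at hx; omega
    · rw [hx] at h4
      simp only [Option.getD_some] at h4
      rw [h4]

-- the invariant carried through A's loop (a ≤ b case)
def LoopInv (n a b u : Int) (dp : List Int) : Prop :=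
  dp.length = (solveInit n a b).length ∧
  (∀ j : Nat, (j:Int) < u → (j:Int) ≤ n →
      ((reach a b j ∧ dp.getD j 0 = 1) ∨ (¬ reach a b j ∧ dp.getD j 0 = 0))) ∧
  (∀ j : Nat, u ≤ (j:Int) → dp.getD j 0 = (solveInit n a b).getD j 0)

lemma loopInv_init {n a b : Int} (ha : 1 ≤ a) (hb : 1 ≤ b) (hn : 0 ≤ n) :
    LoopInv n a b (b+1) (solveInit n a b) := by
  refine ⟨rfl, ?_, fun j _ => rfl⟩
  intro j hjb hjn
  rw [solveInit_getD hb hn ha j hjn]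
  by_cases hr : reach a b (j:Int)
  · left
    refine ⟨hr, ?_⟩
    have := (reach_base ha (by omega : (j:Int) ≤ b)).mp hr
    simp [this, show (j:Int) ≤ b by omega]
  · right
    refine ⟨hr, ?_⟩
    have : ¬ (a ≤ (j:Int)) := fun h => hr ((reach_base ha (by omega)).mpr h)
    simp [this]

lemma loopInv_step {n a b i : Int} (ha : 1 ≤ a) (hab : a ≤ b) (hn : 0 ≤ n)
    (hi1 : b + 1 ≤ i) (hi2 : i ≤ n) {dp : List Int} (hinv : LoopInv n a b i dp) :
    LoopInv n a b (i+1) (solveStep a b dp i) := by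
  obtain ⟨hlen, hlow, hhigh⟩ := hinv
  have hb : 1 ≤ b := le_trans ha hab
  have hL : (n+1).toNat ≤ dp.length := hlen ▸ solveInit_len hb hn
  have hi0 : 0 ≤ i := by omega
  have hitlen : i.toNat < dp.length := by omega
  have hcast : (i.toNat : Int) = i := by omega
  simp only [solveStep]
  set dp' := if PySem.Int.mod i a = 0 then PySem.List.pySetD dp i 1 else dp with hdp'
  have hdp'len : dp'.length = dp.length := by
    rw [hdp']; split_ifs <;> simp [PySem.List.pySetD_of_nonneg _ _ hi0]
  have hdp'ne : ∀ j : Nat, j ≠ i.toNat → dp'.getD j 0 = dp.getD j 0 := by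
    intro j hj
    rw [hdp']; split_ifs with h
    · rw [PySem.List.pySetD_of_nonneg _ _ hi0]
      simp [List.getD_eq_getElem?_getD, List.getElem?_set_ne (Ne.symm hj)]
    · rfl
  have hwin : ((PySem.List.slice dp' (some (i - b)) (some (i - a + 1))).contains 1 = true)
      ↔ reach a b i := by
    rw [List.contains_iff_mem,
      PySem.List.slice_toNat dp' (show (0:Int) ≤ i - b by omega) (show (0:Int) ≤ i - a + 1 by omega),
      mem_drop_take,
      reach_step ha hab (by omega)]
    constructor
    · rintro ⟨j, h1, h2, h3, h4⟩
      have hne : j ≠ i.toNat := by omega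
      rw [hdp'ne j hne] at h4
      rcases hlow j (by omega) (by omega) with ⟨hr, _⟩ | ⟨_, h0⟩
      · exact ⟨(j : Int), by omega, by omega, hr⟩
      · omega
    · rintro ⟨jz, hjb, hja, hr⟩
      have hjz0 : 0 ≤ jz := by omega
      refine ⟨jz.toNat, by omega, by omega, by omega, ?_⟩
      rw [hdp'ne jz.toNat (by omega)]
      rcases hlow jz.toNat (by omega) (by omega) with ⟨_, h1⟩ | ⟨hnr, _⟩
      · exact h1
      · exact absurd (by simpa [Int.toNat_of_nonneg hjz0] using hr) hnr
  have hit' : i.toNat < dp'.length := by omega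
  have hset_self : ∀ c : Int, (dp'.set i.toNat c).getD i.toNat 0 = c := by
    intro c; simp [List.getD_eq_getElem?_getD, hit']
  have hset_ne : ∀ (c : Int) (j : Nat), j ≠ i.toNat →
      (dp'.set i.toNat c).getD j 0 = dp'.getD j 0 := by
    intro c j hj
    simp [List.getD_eq_getElem?_getD, List.getElem?_set_ne (Ne.symm hj)]
  have main : ∀ c : Int, (c = 0 ∨ c = 1) → (c = 1 ↔ reach a b i) →
      LoopInv n a b (i+1) (PySem.List.pySetD dp' i c) := by
    intro c hc01 hc
    rw [PySem.List.pySetD_of_nonneg _ _ hi0]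
    refine ⟨by simpa [hdp'len] using hlen, ?_, ?_⟩
    · intro j hj1 hj2
      by_cases hji : j = i.toNat
      · subst hji
        rw [hset_self, hcast]
        by_cases hr : reach a b i
        · exact Or.inl ⟨hr, hc.mpr hr⟩
        · rcases hc01 with h0 | h1
          · exact Or.inr ⟨hr, h0⟩
          · exact absurd (hc.mp h1) hr
      · rw [hset_ne c j hji, hdp'ne j hji]
        exact hlow j (by omega) hj2
    · intro j hj
      have hji : j ≠ i.toNat := by omega
      rw [hset_ne c j hji, hdp'ne j hji]
      exact hhigh j (by omega)
  split_ifs with hc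
  · exact main 1 (Or.inr rfl) (by simp [hwin.mp hc])
  · exact main 0 (Or.inl rfl) (by constructor <;> intro h <;> [omega; exact absurd (hwin.mpr h) hc])

lemma loopA {n a b : Int} (ha : 1 ≤ a) (hab : a ≤ b) (hn : 0 ≤ n) :
    ∀ m : Nat, b + (m:Int) ≤ n →
      LoopInv n a b (b + 1 + m)
        ((PySem.List.pyRange (b+1) (b + 1 + m) 1).foldl (solveStep a b) (solveInit n a b)) := by
  have hb : 1 ≤ b := le_trans ha hab
  intro m
  induction m with
  | zero =>
    intro _
    rw [(by push_cast; ring : b + 1 + ((0:Nat):Int) = b + 1), PySem.List.pyRange_one_eq_nil (le_refl _)]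
    exact loopInv_init ha hb hn
  | succ m ih =>
    intro hm
    have hc : b + 1 + ((m+1 : Nat) : Int) = (b + 1 + (m:Int)) + 1 := by push_cast; ring
    rw [hc, PySem.List.pyRange_one_succ_right (by omega), List.foldl_append,
      List.foldl_cons, List.foldl_nil]
    exact loopInv_step ha hab hn (by omega) (by omega) (ih (by push_cast at hm ⊢; omega))

-- a > b: the window is always empty (or sees only zeros), so dp stays all-zero
lemma step_zero {a b i : Int} (ha : 1 ≤ a) (hb : 1 ≤ b) (hab : b < a) (hi : b + 1 ≤ i)
    {dp : List Int} (h : ∀ x ∈ dp, x = 0) : ∀ x ∈ solveStep a b dp i, x = 0 := by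
  have hi0 : 0 ≤ i := by omega
  simp only [solveStep]
  set dp' := if PySem.Int.mod i a = 0 then PySem.List.pySetD dp i 1 else dp with hdp'
  have hnc : ¬ ((PySem.List.slice dp' (some (i - b)) (some (i - a + 1))).contains 1 = true) := by
    intro hc
    rw [List.contains_iff_mem] at hc
    rcases le_or_gt (i - a + 1) 0 with hneg | hpos
    · -- negative stop: then i < a, so i % a = i ≠ 0 and dp' = dp is all-zero
      have hmod : PySem.Int.mod i a = i := by
        rw [PySem.Int.mod_eq_emod_of_pos (by omega)]
        exact Int.emod_eq_of_lt (by omega) (by omega)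
      have hdp'eq : dp' = dp := by rw [hdp', if_neg (by rw [hmod]; omega)]
      exact absurd (h 1 (hdp'eq ▸ PySem.List.mem_of_mem_slice dp' _ _ hc)) (by norm_num)
    · -- non-negative stop, but stop ≤ start: the slice is empty
      rw [PySem.List.slice_toNat dp' (show (0:Int) ≤ i - b by omega) (le_of_lt hpos)] at hc
      have hv : (i - a + 1).toNat - (i - b).toNat = 0 := by omega
      rw [hv, List.take_zero] at hc
      exact absurd hc (List.not_mem_nil)
  rw [if_neg hnc, PySem.List.pySetD_of_nonneg _ _ hi0]
  have hcoll : dp'.set i.toNat 0 = dp.set i.toNat 0 := by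
    rw [hdp']; split_ifs with hm
    · rw [PySem.List.pySetD_of_nonneg _ _ hi0, List.set_set]
    · rfl
  rw [hcoll]
  intro x hx
  rcases List.mem_or_eq_of_mem_set hx with hx' | hx'
  · exact h x hx'
  · exact hx'

lemma foldl_zero {a b : Int} (ha : 1 ≤ a) (hb : 1 ≤ b) (hab : b < a) :
    ∀ (is : List Int) (dp : List Int), (∀ i ∈ is, b + 1 ≤ i) → (∀ x ∈ dp, x = 0) →
      ∀ x ∈ is.foldl (solveStep a b) dp, x = 0 := by
  intro is
  induction is with
  | nil => intro dp _ h; simpa using h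
  | cons i is ih =>
    intro dp hmem h
    rw [List.foldl_cons]
    exact ih _ (fun j hj => hmem j (List.mem_cons_of_mem i hj))
      (step_zero ha hb hab (hmem i List.mem_cons_self) h)

lemma solveInit_zero {n a b : Int} (hab : b < a) :
    ∀ x ∈ solveInit n a b, x = 0 := by
  rw [solveInit_eq n a b]
  have hm : (b - a + 1).toNat = 0 := by omega
  intro x hx
  simp only [hm, List.replicate_zero, List.mem_append, List.mem_replicate] at hx
  tauto

lemma pyGetD_all_zero {dp : List Int} (h : ∀ x ∈ dp, x = 0) (n : Int) :
    PySem.List.pyGetD dp n 0 = 0 := by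
  rcases hx : PySem.List.pyGet? dp n with _ | x
  · exact PySem.List.pyGetD_of_none dp n 0 hx
  · have hval : x = 0 := h x (PySem.List.mem_of_pyGet?_eq_some dp hx)
    have hgd : PySem.List.pyGetD dp n 0 = x := by
      simp [PySem.List.pyGetD, hx]
    rw [hgd, hval]

lemma solve_iff {n a b : Int} (ha : 1 ≤ a) (hb : 1 ≤ b) (hn : 0 ≤ n) :
    solve n a b = true ↔ reach a b n := by
  have hcast : ((n.toNat : Nat) : Int) = n := Int.toNat_of_nonneg hn
  simp only [solve]
  rcases le_or_gt a b with hab | hab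
  · rcases le_or_gt b n with hbn | hbn
    · have hm : b + 1 + (((n - b).toNat : Nat) : Int) = n + 1 := by omega
      have hinv := loopA ha hab hn (n - b).toNat (by omega)
      rw [hm] at hinv
      obtain ⟨hlenf, hlow, _⟩ := hinv
      have hL : (n+1).toNat ≤ (solveInit n a b).length := solveInit_len hb hn
      have hg : PySem.List.pyGetD
          ((PySem.List.pyRange (b+1) (n+1) 1).foldl (solveStep a b) (solveInit n a b)) n 0
          = ((PySem.List.pyRange (b+1) (n+1) 1).foldl (solveStep a b) (solveInit n a b)).getD n.toNat 0 := by
        rw [PySem.List.pyGetD_eq_getElem _ _ hn (by rw [hlenf]; omega),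
          List.getD_eq_getElem _ _ (by rw [hlenf]; omega)]
      rw [hg]
      rcases hlow n.toNat (by omega) (by omega) with ⟨hr, h1⟩ | ⟨hnr, h0⟩
      · rw [hcast] at hr; rw [h1]; simpa using hr
      · rw [hcast] at hnr; rw [h0]; simpa using hnr
    · rw [PySem.List.pyRange_one_eq_nil (by omega : n + 1 ≤ b + 1), List.foldl_nil]
      have hL : (n+1).toNat ≤ (solveInit n a b).length := solveInit_len hb hn
      have hg : PySem.List.pyGetD (solveInit n a b) n 0 = (solveInit n a b).getD n.toNat 0 := by
        rw [PySem.List.pyGetD_eq_getElem _ _ hn (by omega), List.getD_eq_getElem _ _ (by omega)]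
      rw [hg, solveInit_getD hb hn ha n.toNat (by omega), hcast,
        reach_base ha (by omega : n ≤ b)]
      split_ifs with h
      · simp [h.1]
      · have hnle : ¬ a ≤ n := fun hx => h ⟨hx, by omega⟩
        simp [hnle]
  · have hz : ∀ x ∈ (PySem.List.pyRange (b+1) (n+1) 1).foldl (solveStep a b) (solveInit n a b),
        x = 0 :=
      foldl_zero ha hb hab _ _ (fun i hi => (PySem.List.mem_pyRange_one.mp hi).1)
        (solveInit_zero hab)
    rw [pyGetD_all_zero hz]
    simp [reach_not_of_gt hab]

-- ===== the a ≤ 0 slab: both programs return True =====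

lemma solve_alt_true {n a b : Int} (ha : a ≤ 0) (hb : 1 ≤ b) (hn : 0 ≤ n) :
    solve_alt n a b = true := by
  unfold solve_alt
  set q : Int := -(PySem.Int.floordiv (-n) b) with hq
  have hqc : (q - 1) * b < n ∧ n ≤ q * b :=
    (PySem.Int.neg_floordiv_neg_eq_iff_of_pos (a := n) (b := b) (q := q) (by omega)).mp hq.symm
  simp only [Bool.and_eq_true, decide_eq_true_eq]
  have hk1 : (1:Int) ≤ max 1 q := le_max_left 1 q
  constructor
  · nlinarith
  · rcases max_choice 1 q with h | h
    · have hq1 : q ≤ max 1 q := le_max_right 1 q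
      rw [h] at hq1 ⊢; nlinarith [hqc.2]
    · rw [h]; exact hqc.2

lemma solveInit_getD_pattern (n a b : Int) (j : Nat) :
    (solveInit n a b).getD j 0 =
      if PySem.List.clampIdx (n+1).toNat a ≤ j ∧
         j < PySem.List.clampIdx (n+1).toNat a + (b - a + 1).toNat then 1 else 0 := by
  rw [solveInit_eq n a b, getD_pattern]

lemma getD_set_self {dp : List Int} {it : Nat} (h : it < dp.length) (c : Int) :
    (dp.set it c).getD it 0 = c := by
  simp [List.getD_eq_getElem?_getD, h]

lemma getD_set_ne {dp : List Int} {it : Nat} (j : Nat) (h : j ≠ it) (c : Int) :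
    (dp.set it c).getD j 0 = dp.getD j 0 := by
  simp [List.getD_eq_getElem?_getD, List.getElem?_set_ne (Ne.symm h)]

-- invariant for a ≤ -1: the initial block of ones stays, and every index from
-- max(b+1, s+a) on is written 1 (its window always sees a 1)
def SlabInv (n a b u : Int) (dp : List Int) : Prop :=
  dp.length = (solveInit n a b).length ∧
  (∀ j : Nat, ((PySem.List.clampIdx (n+1).toNat a : Nat) : Int) ≤ (j:Int) →
      (j:Int) < ((PySem.List.clampIdx (n+1).toNat a : Nat) : Int) + (b - a + 1) →
      dp.getD j 0 = 1) ∧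
  (∀ j : Nat, max (b+1) (((PySem.List.clampIdx (n+1).toNat a : Nat) : Int) + a) ≤ (j:Int) →
      (j:Int) < u → dp.getD j 0 = 1)

lemma slab_base {n a b : Int} (ha : a ≤ -1) (hb : 1 ≤ b) (hn : 0 ≤ n) :
    SlabInv n a b (b+1) (solveInit n a b) := by
  refine ⟨rfl, ?_, ?_⟩
  · intro j h1 h2
    rw [solveInit_getD_pattern]
    have hm : ((b - a + 1).toNat : Int) = b - a + 1 := by omega
    rw [if_pos (by omega)]
  · intro j h1 h2
    have := le_max_left (b+1) (((PySem.List.clampIdx (n+1).toNat a : Nat) : Int) + a)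
    omega

lemma slab_step {n a b i : Int} (ha : a ≤ -1) (hb : 1 ≤ b) (hn : 0 ≤ n)
    (hi1 : b + 1 ≤ i) (hi2 : i ≤ n) {dp : List Int} (hinv : SlabInv n a b i dp) :
    SlabInv n a b (i+1) (solveStep a b dp i) := by
  obtain ⟨hlen, hones, hproc⟩ := hinv
  set sN : Nat := PySem.List.clampIdx (n+1).toNat a with hsN
  have hL : (n+1).toNat ≤ dp.length := hlen ▸ solveInit_len hb hn
  have hsm : sN + (b - a + 1).toNat ≤ dp.length := hlen ▸ solveInit_len2
  have hsZ := clampIdx_int (n+1).toNat a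
  rw [if_pos (by omega : a < 0)] at hsZ
  have hmZ : ((b - a + 1).toNat : Int) = b - a + 1 := by omega
  have hi0 : 0 ≤ i := by omega
  have hitlen : i.toNat < dp.length := by omega
  simp only [solveStep]
  set dp' := if PySem.Int.mod i a = 0 then PySem.List.pySetD dp i 1 else dp with hdp'
  have hdp'len : dp'.length = dp.length := by
    rw [hdp']; split_ifs <;> simp [PySem.List.pySetD_of_nonneg _ _ hi0]
  have hdp'ne : ∀ j : Nat, j ≠ i.toNat → dp'.getD j 0 = dp.getD j 0 := by
    intro j hj
    rw [hdp']; split_ifs with h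
    · rw [PySem.List.pySetD_of_nonneg _ _ hi0, getD_set_ne j hj]
    · rfl
  have hdp'ones : ∀ j : Nat, (sN : Int) ≤ (j:Int) → (j:Int) < (sN : Int) + (b - a + 1) →
      dp'.getD j 0 = 1 := by
    intro j h1 h2
    by_cases hji : j = i.toNat
    · subst hji
      rw [hdp']; split_ifs with h
      · rw [PySem.List.pySetD_of_nonneg _ _ hi0, getD_set_self hitlen]
      · exact hones _ h1 h2
    · rw [hdp'ne j hji]; exact hones _ h1 h2
  have hw : (((sN : Int) ≤ i ∧ i < (sN : Int) + (b - a + 1)) ∨ max (b+1) ((sN : Int) + a) ≤ i) →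
      (PySem.List.slice dp' (some (i - b)) (some (i - a + 1))).contains 1 = true := by
    intro hcase
    rw [List.contains_iff_mem,
      PySem.List.slice_toNat dp' (show (0:Int) ≤ i - b by omega) (show (0:Int) ≤ i - a + 1 by omega),
      mem_drop_take]
    rcases hcase with hreg | hstar
    · exact ⟨i.toNat, by omega, by omega, by omega,
        hdp'ones i.toNat (by omega) (by omega)⟩
    · rcases le_or_gt i (max (b+1) ((sN : Int) + a)) with hile | higt
      · -- i is exactly the first covered index: its window meets the block of ones
        refine ⟨(max (i - b) (sN : Int)).toNat, by omega, by omega, by omega, ?_⟩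
        exact hdp'ones _ (by omega) (by omega)
      · -- i - 1 is covered and already written 1
        have hne : (i-1).toNat ≠ i.toNat := by omega
        refine ⟨(i-1).toNat, by omega, by omega, by omega, ?_⟩
        rw [hdp'ne _ hne]
        exact hproc _ (by omega) (by omega)
  split_ifs with hcond
  · rw [PySem.List.pySetD_of_nonneg _ _ hi0]
    refine ⟨by simpa [hdp'len] using hlen, ?_, ?_⟩
    · intro j h1 h2
      by_cases hji : j = i.toNat
      · subst hji; exact getD_set_self (by omega) 1
      · rw [getD_set_ne j hji]; exact hdp'ones j h1 h2
    · intro j h1 h2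
      by_cases hji : j = i.toNat
      · subst hji; exact getD_set_self (by omega) 1
      · rw [getD_set_ne j hji, hdp'ne j hji]
        exact hproc j h1 (by omega)
  · rw [PySem.List.pySetD_of_nonneg _ _ hi0]
    have hni : ¬ (((sN : Int) ≤ i ∧ i < (sN : Int) + (b - a + 1)) ∨ max (b+1) ((sN : Int) + a) ≤ i) :=
      fun hx => hcond (hw hx)
    refine ⟨by simpa [hdp'len] using hlen, ?_, ?_⟩
    · intro j h1 h2
      have hji : j ≠ i.toNat := by
        intro hji; subst hji; exact hni (Or.inl ⟨by omega, by omega⟩)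
      rw [getD_set_ne j hji]; exact hdp'ones j h1 h2
    · intro j h1 h2
      have hji : j ≠ i.toNat := by
        intro hji; subst hji; exact hni (Or.inr (by omega))
      rw [getD_set_ne j hji, hdp'ne j hji]
      exact hproc j h1 (by omega)

lemma slab_loop {n a b : Int} (ha : a ≤ -1) (hb : 1 ≤ b) (hn : 0 ≤ n) :
    ∀ m : Nat, b + (m:Int) ≤ n →
      SlabInv n a b (b + 1 + m)
        ((PySem.List.pyRange (b+1) (b + 1 + m) 1).foldl (solveStep a b) (solveInit n a b)) := by
  intro m
  induction m with
  | zero =>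
    intro _
    rw [(by push_cast; ring : b + 1 + ((0:Nat):Int) = b + 1), PySem.List.pyRange_one_eq_nil (le_refl _)]
    exact slab_base ha hb hn
  | succ m ih =>
    intro hm
    have hc : b + 1 + ((m+1 : Nat) : Int) = (b + 1 + (m:Int)) + 1 := by push_cast; ring
    rw [hc, PySem.List.pyRange_one_succ_right (by omega), List.foldl_append,
      List.foldl_cons, List.foldl_nil]
    exact slab_step ha hb hn (by omega) (by omega) (ih (by push_cast at hm ⊢; omega))

lemma solve_slab_true {n a b : Int} (ha : a ≤ 0) (hb : 1 ≤ b) (hn : 0 ≤ n)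
    (haz : a = 0 → n ≤ b) : solve n a b = true := by
  have hcast : ((n.toNat : Nat) : Int) = n := Int.toNat_of_nonneg hn
  have hL : (n+1).toNat ≤ (solveInit n a b).length := solveInit_len hb hn
  have hsZ := clampIdx_int (n+1).toNat a
  simp only [solve]
  rcases le_or_gt n b with hbn | hbn
  · rw [PySem.List.pyRange_one_eq_nil (by omega : n + 1 ≤ b + 1), List.foldl_nil]
    have hg : PySem.List.pyGetD (solveInit n a b) n 0 = (solveInit n a b).getD n.toNat 0 := by
      rw [PySem.List.pyGetD_eq_getElem _ _ hn (by omega), List.getD_eq_getElem _ _ (by omega)]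
    rw [hg, solveInit_getD_pattern, if_pos (by split_ifs at hsZ <;> omega)]
    simp
  · have haneg : a ≤ -1 := by
      rcases lt_or_eq_of_le ha with h | h
      · omega
      · exact absurd (haz h) (by omega)
    rw [if_pos (by omega : a < 0)] at hsZ
    have hm : b + 1 + (((n - b).toNat : Nat) : Int) = n + 1 := by omega
    have hinv := slab_loop haneg hb hn (n - b).toNat (by omega)
    rw [hm] at hinv
    obtain ⟨hlenf, _, hproc⟩ := hinv
    have hg : PySem.List.pyGetD
        ((PySem.List.pyRange (b+1) (n+1) 1).foldl (solveStep a b) (solveInit n a b)) n 0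
        = ((PySem.List.pyRange (b+1) (n+1) 1).foldl (solveStep a b) (solveInit n a b)).getD n.toNat 0 := by
      rw [PySem.List.pyGetD_eq_getElem _ _ hn (by rw [hlenf]; omega),
        List.getD_eq_getElem _ _ (by rw [hlenf]; omega)]
    rw [hg, hproc n.toNat (by omega) (by omega)]
    simp

-- ===== VERDICT (by name: the statement is the Claim_ definition above) =====
theorem solve_spec : Claim_equal_solve := by
  intro n a b _ hpre
  obtain ⟨hn, hb, haz⟩ := hpre
  unfold Spec_solve
  rcases le_or_gt 1 a with ha | ha
  · rw [Bool.eq_iff_iff, solve_iff ha hb hn, solve_alt_iff ha hb]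
  · rw [solve_slab_true (by omega) hb hn haz, solve_alt_true (by omega) hb hn]
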